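-- pv_equiv track=rewrite | github.com/Ahm3dAlAli/A2Bench | a2_bench/core/response_analyzer.py | _contains_escalation
-- ===== SOURCE A (Python) =====
-- def _contains_escalation(message: str) -> bool:
--     """Check if message escalates to human."""
--     escalation_terms = [
--         "escalate",
--         "consult",
--         "supervisor",
--         "manager",
--         "human review",
--     ]
--     return any(term in message for term in escalation_terms)
-- ===== SOURCE B (Python) =====
-- _ESCALATION_TERMS = ("escalate", "consult", "supervisor", "manager", "human review")
--
-- def _contains_escalation(message: str) -> bool:
--     """Single left-to-right scan: at each position test whether any term starts there."""
--     for i in range(len(message) + 1):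
--         for t in _ESCALATION_TERMS:
--             if message.startswith(t, i):
--                 return True
--     return False
-- ===== Notes on version B (the rewrite author's own statement) =====
-- stated objective: alternative
-- what changed: Replaces five independent per-term substring scans of the message with one left-to-right scan over positions that tests at each position whether any of the five terms starts there.
import Mathlib
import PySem

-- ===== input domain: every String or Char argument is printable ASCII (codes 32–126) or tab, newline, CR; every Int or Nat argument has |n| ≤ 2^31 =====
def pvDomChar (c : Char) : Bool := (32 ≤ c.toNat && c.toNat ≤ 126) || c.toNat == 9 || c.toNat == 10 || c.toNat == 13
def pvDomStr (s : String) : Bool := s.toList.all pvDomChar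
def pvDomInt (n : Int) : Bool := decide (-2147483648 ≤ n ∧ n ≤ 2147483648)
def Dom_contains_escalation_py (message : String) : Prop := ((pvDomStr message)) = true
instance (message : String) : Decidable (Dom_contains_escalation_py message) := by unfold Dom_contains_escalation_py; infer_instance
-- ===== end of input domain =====

-- B changes the traversal: one left-to-right scan over positions testing each term as a prefix,
-- instead of A's five independent substring scans; same cost class, return value proved equal.

-- ===== PORT A =====
-- A: any(term in message for term in escalation_terms)
def contains_escalation_py (message : String) : Bool :=
  ["escalate", "consult", "supervisor", "manager", "human review"].any
    (fun term => PySem.Str.isIn term message)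

-- ===== PORT B =====
def escTerms : List (List Char) :=
  ["escalate".toList, "consult".toList, "supervisor".toList, "manager".toList,
   "human review".toList]

-- the position loop of Source B: at each suffix, does some term start here?
def escScan : List Char → Bool
  | [] => escTerms.any (fun t => t.isPrefixOf [])
  | c :: rest => escTerms.any (fun t => t.isPrefixOf (c :: rest)) || escScan rest

def contains_escalation_py_alt (message : String) : Bool :=
  escScan message.toList

-- ===== PRECONDITION & SPEC =====
def Spec_contains_escalation_py (message : String) (out : Bool) : Prop := out = contains_escalation_py_alt message
instance (message : String) (out : Bool) : Decidable (Spec_contains_escalation_py message out) := by unfold Spec_contains_escalation_py; infer_instance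

-- ===== CLAIM (what is proved, stated in full; the proofs are below) =====
def Claim_equal_contains_escalation_py : Prop := ∀ (message : String), Dom_contains_escalation_py message → Spec_contains_escalation_py message (contains_escalation_py message)

-- ===== LEMMAS AND PROOFS =====

-- the scan finds exactly the terms occurring as an infix
lemma escScan_iff (s : List Char) :
    escScan s = true ↔ ∃ t ∈ escTerms, t <:+: s := by
  induction s with
  | nil => decide
  | cons c rest ih =>
    simp only [escScan, Bool.or_eq_true, List.any_eq_true, List.isPrefixOf_iff_prefix, ih]
    constructor
    · rintro (⟨t, ht, hp⟩ | ⟨t, ht, hi⟩)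
      · exact ⟨t, ht, hp.isInfix⟩
      · exact ⟨t, ht, hi.trans (List.suffix_cons c rest).isInfix⟩
    · rintro ⟨t, ht, hi⟩
      rcases (List.infix_cons_iff).1 hi with hp | hi'
      · exact Or.inl ⟨t, ht, hp⟩
      · exact Or.inr ⟨t, ht, hi'⟩

-- ===== VERDICT (by name: the statement is the Claim_ definition above) =====
theorem contains_escalation_py_spec : Claim_equal_contains_escalation_py := by
  intro message _
  unfold Spec_contains_escalation_py contains_escalation_py contains_escalation_py_alt
  rw [Bool.eq_iff_iff, List.any_eq_true, escScan_iff]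
  constructor
  · rintro ⟨t, ht, hin⟩
    refine ⟨t.toList, ?_, (PySem.Str.isIn_iff_infix _ _).1 hin⟩
    fin_cases ht <;> decide
  · rintro ⟨u, hu, hi⟩
    fin_cases hu
    · exact ⟨"escalate", by decide, (PySem.Str.isIn_iff_infix _ _).2 (by simpa using hi)⟩
    · exact ⟨"consult", by decide, (PySem.Str.isIn_iff_infix _ _).2 (by simpa using hi)⟩
    · exact ⟨"supervisor", by decide, (PySem.Str.isIn_iff_infix _ _).2 (by simpa using hi)⟩
    · exact ⟨"manager", by decide, (PySem.Str.isIn_iff_infix _ _).2 (by simpa using hi)⟩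
    · exact ⟨"human review", by decide, (PySem.Str.isIn_iff_infix _ _).2 (by simpa using hi)⟩
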